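-- pv_equiv track=rewrite | github.com/nsih/PS | Files/tag/33. two pointer/5. sub set (meet in the middle).py | count_subsets
-- ===== SOURCE A (Python) =====
-- def count_subsets(weights, capacity):
--     n = len(weights)
--     mid = n//2
--
--     #
--     left_part = weights[:mid]
--     left_sums = []
--     right_part = weights[mid:]
--     right_sums = []
--
--     #모든 부분집합의 합구하는 함수
--     def subset_sum(arr, subset_sums):
--         n = len(arr)
--         for i in range(1 << n): #2^n 부분집합 생성
--             sum_val = 0
--             for j in range(n):
--                 if i & (1 << j): #i의 j번째 비트가 1이면 arr[j]에 포함
--                     sum_val += arr[j]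
--             subset_sums.append(sum_val)
--
--     #부분집합들의 합 구하고 정렬
--     subset_sum(left_part,left_sums)
--     subset_sum(right_part,right_sums)
--
--     left_sums.sort()
--     right_sums.sort()
--
--     cnt = 0
--     left,right = 0, len(right_sums) - 1
--
--     while left < len(left_sums) and right >= 0:
--         if left_sums[left] + right_sums[right] <= capacity:
--             cnt += right + 1
--             left += 1
--         else:
--             right -= 1
--
--     return cnt
-- ===== SOURCE B (Python) =====
-- def count_subsets(weights, capacity):
--     mid = len(weights) // 2
--
--     # all subset sums, built by incremental doubling (no bitmask loop)
--     def all_sums(arr):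
--         sums = [0]
--         for w in arr:
--             sums = sums + [s + w for s in sums]
--         return sums
--
--     left_sums = all_sums(weights[:mid])
--     right_sums = sorted(all_sums(weights[mid:]))
--
--     # number of entries of right_sums that are <= t (binary search, upper bound)
--     def count_le(t):
--         lo, hi = 0, len(right_sums)
--         while lo < hi:
--             m = (lo + hi) // 2
--             if right_sums[m] <= t:
--                 lo = m + 1
--             else:
--                 hi = m
--         return lo
--
--     return sum(count_le(capacity - s) for s in left_sums)
-- ===== Notes on version B (the rewrite author's own statement) =====
-- stated objective: alternative
-- what changed: Replaces the bitmask enumeration (inner bit-test loop per mask) by incremental doubling of the subset-sum list, and replaces the sort-both-halves two-pointer count by sorting only the right half and counting with a hand-written binary search per left sum.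
import Mathlib
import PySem

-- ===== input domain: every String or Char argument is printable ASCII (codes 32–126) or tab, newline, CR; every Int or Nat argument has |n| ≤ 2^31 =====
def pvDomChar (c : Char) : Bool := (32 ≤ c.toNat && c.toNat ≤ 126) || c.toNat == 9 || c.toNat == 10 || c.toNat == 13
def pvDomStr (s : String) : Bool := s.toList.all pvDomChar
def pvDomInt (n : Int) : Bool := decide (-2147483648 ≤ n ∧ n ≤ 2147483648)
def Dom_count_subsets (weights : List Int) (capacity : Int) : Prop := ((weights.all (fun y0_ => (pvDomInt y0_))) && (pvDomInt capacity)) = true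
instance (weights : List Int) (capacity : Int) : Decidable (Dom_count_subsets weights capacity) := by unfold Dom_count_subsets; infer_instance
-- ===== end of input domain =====

-- B replaces A's bitmask enumeration + sort-both-halves + two-pointer by incremental
-- doubling of the subset-sum lists, sorting only the right half, and a per-left-sum
-- binary search (alternative algorithm of the same asymptotic cost).

-- ===== PORT A =====
-- '1 << k' for a nonnegative Python int k
def pvShl1 (k : Nat) : Int := (1 : Int) <<< k

-- helper subset_sum(arr, subset_sums): Python appends to the passed list; modeled as returning the extended list.
-- 'i & (1 << j)' truthiness of the nonnegative ints is ported exactly as 'PySem.Int.band … ≠ 0'.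
def pvSubsetSum (arr : List Int) (subset_sums : List Int) : List Int :=
  let n := PySem.List.len arr
  (PySem.List.pyRange 0 (pvShl1 n.toNat) 1).foldl
    (fun acc i =>
      acc ++ [(PySem.List.pyRange 0 n 1).foldl
        (fun sum_val j =>
          if PySem.Int.band i (pvShl1 j.toNat) ≠ 0 then sum_val + PySem.List.pyGetD arr j 0
          else sum_val) 0])
    subset_sums

-- the while loop of A; left/right/cnt are Python ints; every index read is in range.
def pvTwoPtr (left_sums right_sums : List Int) (capacity : Int) (left right cnt : Int) : Int :=
  if h : left < PySem.List.len left_sums ∧ 0 ≤ right then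
    if PySem.List.pyGetD left_sums left 0 + PySem.List.pyGetD right_sums right 0 ≤ capacity then
      pvTwoPtr left_sums right_sums capacity (left + 1) right (cnt + right + 1)
    else
      pvTwoPtr left_sums right_sums capacity left (right - 1) cnt
  else cnt
termination_by ((PySem.List.len left_sums - left) + (right + 1)).toNat
decreasing_by
  · simp only [PySem.List.len_eq] at *; omega
  · simp only [PySem.List.len_eq] at *; omega

def count_subsets (weights : List Int) (capacity : Int) : Int :=
  let n := PySem.List.len weights
  let mid := PySem.Int.floordiv n 2
  let left_part := PySem.List.slice weights none (some mid)
  let right_part := PySem.List.slice weights (some mid) none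
  let left_sums := pvSubsetSum left_part []
  let right_sums := pvSubsetSum right_part []
  let left_sums2 := PySem.List.sorted left_sums (fun x => x) false
  let right_sums2 := PySem.List.sorted right_sums (fun x => x) false
  pvTwoPtr left_sums2 right_sums2 capacity 0 (PySem.List.len right_sums2 - 1) 0

-- ===== PORT B =====
-- all_sums(arr): incremental doubling
def pvAllSums (arr : List Int) : List Int :=
  arr.foldl (fun sums w => sums ++ sums.map (fun s => s + w)) [0]

-- count_le(t): the hand-written binary search of Source B; lo/hi stay nonnegative, kept as Nat ((lo+hi)//2 is Nat division, exact here)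
def pvCountLe (right_sums : List Int) (t : Int) (lo hi : Nat) : Nat :=
  if lo < hi then
    let m := (lo + hi) / 2
    if right_sums.getD m 0 ≤ t then pvCountLe right_sums t (m + 1) hi
    else pvCountLe right_sums t lo m
  else lo
termination_by hi - lo

def count_subsets_alt (weights : List Int) (capacity : Int) : Int :=
  let mid := PySem.Int.floordiv (PySem.List.len weights) 2
  let left_sums := pvAllSums (PySem.List.slice weights none (some mid))
  let right_sums := PySem.List.sorted (pvAllSums (PySem.List.slice weights (some mid) none)) (fun x => x) false
  (left_sums.map (fun s => (pvCountLe right_sums (capacity - s) 0 right_sums.length : Int))).sum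

-- ===== PRECONDITION & SPEC =====
def Spec_count_subsets (weights : List Int) (capacity : Int) (out : Int) : Prop := out = count_subsets_alt weights capacity
instance (weights : List Int) (capacity : Int) (out : Int) : Decidable (Spec_count_subsets weights capacity out) := by unfold Spec_count_subsets; infer_instance

-- ===== CLAIM (what is proved, stated in full; the proofs are below) =====
def Claim_equal_count_subsets : Prop := ∀ (weights : List Int) (capacity : Int), Dom_count_subsets weights capacity → Spec_count_subsets weights capacity (count_subsets weights capacity)

-- ===== LEMMAS AND PROOFS =====

def pvCnt (cap l : Int) (R : List Int) : Int :=
  (R.countP (fun r => decide (l + r ≤ cap)) : Int)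

def pvF (cap : Int) : List Int → List Int → Int
  | [], _ => 0
  | _ :: _, [] => 0
  | l :: ls, r :: rs =>
    if l + r ≤ cap then ((rs.length : Int) + 1) + pvF cap ls (r :: rs)
    else pvF cap (l :: ls) rs
termination_by L R => L.length + R.length

theorem pvF_spec (cap : Int) (L Rr : List Int) (hL : L.Pairwise (· ≤ ·))
    (hR : Rr.Pairwise (fun a b => b ≤ a)) :
    pvF cap L Rr = (L.map (fun l => pvCnt cap l Rr)).sum := by
  revert hL hR
  fun_induction pvF cap L Rr with
  | case1 Rr => simp
  | case2 l ls => intro _ _; simp [pvCnt]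
  | case3 l ls r rs hle ih =>
    intro hL hR
    have hhead : ∀ x ∈ rs, x ≤ r := (List.pairwise_cons.mp hR).1
    have hcnt : pvCnt cap l (r :: rs) = (rs.length : Int) + 1 := by
      unfold pvCnt
      have hall : ∀ a ∈ r :: rs, (fun x => decide (l + x ≤ cap)) a = true := by
        intro a ha
        simp only [List.mem_cons] at ha
        rcases ha with rfl | ha
        · simpa using hle
        · have := hhead a ha
          simp only [decide_eq_true_eq]
          omega
      rw [List.countP_eq_length.mpr hall]
      simp
    rw [List.map_cons, List.sum_cons, hcnt, ih (List.pairwise_cons.mp hL).2 hR]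
  | case4 l ls r rs hle ih =>
    intro hL hR
    have hlmin : ∀ x ∈ ls, l ≤ x := (List.pairwise_cons.mp hL).1
    rw [ih hL (List.pairwise_cons.mp hR).2]
    congr 1
    apply List.map_congr_left
    intro a ha
    have hla : l ≤ a := by
      rcases List.mem_cons.mp ha with rfl | h
      · exact le_refl _
      · exact hlmin a h
    unfold pvCnt
    rw [List.countP_cons_of_neg]
    simp; omega

theorem pvTwoPtr_eq (L R : List Int) (cap : Int) (left right cnt : Int)
    (hl : 0 ≤ left) (hr : right < PySem.List.len R) :
    pvTwoPtr L R cap left right cnt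
      = cnt + pvF cap (L.drop left.toNat) ((R.take (right + 1).toNat).reverse) := by
  revert hl hr
  fun_induction pvTwoPtr L R cap left right cnt with
  | case1 left right cnt h hle ih =>
    intro hl hr
    simp only [PySem.List.len_eq] at h hr
    obtain ⟨hlt, hrge⟩ := h
    have hlN : left.toNat < L.length := by omega
    have hrN : right.toNat < R.length := by omega
    rw [ih (by omega) hr]
    rw [List.drop_eq_getElem_cons hlN]
    have htake : R.take (right + 1).toNat = R.take right.toNat ++ R[right.toNat]?.toList := by
      have : (right + 1).toNat = right.toNat + 1 := by omega
      rw [this, List.take_add_one]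
    rw [htake]
    have : (R.take right.toNat ++ R[right.toNat]?.toList).reverse
        = R[right.toNat] :: (R.take right.toNat).reverse := by
      simp [List.getElem?_eq_getElem hrN]
    rw [this]
    have hLget : PySem.List.pyGetD L left 0 = L[left.toNat] := PySem.List.pyGetD_eq_getElem L 0 hl hlt
    have hRget : PySem.List.pyGetD R right 0 = R[right.toNat] := PySem.List.pyGetD_eq_getElem R 0 hrge hr
    rw [hLget, hRget] at hle
    show _ = cnt + pvF cap (L[left.toNat] :: L.drop (left.toNat + 1)) (R[right.toNat] :: (R.take right.toNat).reverse)
    rw [pvF]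
    rw [if_pos hle]
    have hlen : ((R.take right.toNat).reverse.length : Int) + 1 = right + 1 := by
      simp [List.length_take]; omega
    rw [hlen]
    have : (left + 1).toNat = left.toNat + 1 := by omega
    rw [this] at *
    ring
  | case2 left right cnt h hle ih =>
    intro hl hr
    simp only [PySem.List.len_eq] at h hr
    obtain ⟨hlt, hrge⟩ := h
    have hlN : left.toNat < L.length := by omega
    have hrN : right.toNat < R.length := by omega
    rw [ih hl (by simp only [PySem.List.len_eq]; omega)]
    have h1 : (right - 1 + 1).toNat = right.toNat := by omega
    rw [h1]
    rw [List.drop_eq_getElem_cons hlN]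
    have htake : R.take (right + 1).toNat = R.take right.toNat ++ R[right.toNat]?.toList := by
      have : (right + 1).toNat = right.toNat + 1 := by omega
      rw [this, List.take_add_one]
    rw [htake]
    have hrev : (R.take right.toNat ++ R[right.toNat]?.toList).reverse
        = R[right.toNat] :: (R.take right.toNat).reverse := by
      simp [List.getElem?_eq_getElem hrN]
    rw [hrev]
    have hLget : PySem.List.pyGetD L left 0 = L[left.toNat] := PySem.List.pyGetD_eq_getElem L 0 hl hlt
    have hRget : PySem.List.pyGetD R right 0 = R[right.toNat] := PySem.List.pyGetD_eq_getElem R 0 hrge hr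
    rw [hLget, hRget] at hle
    rw [pvF, if_neg hle]
  | case3 left right cnt h =>
    intro hl hr
    simp only [PySem.List.len_eq, not_and, not_le] at h
    by_cases hL : left < (L.length : Int)
    · have hrneg : right < 0 := by have := h hL; omega
      have : (right + 1).toNat = 0 := by omega
      rw [this]
      simp only [List.take_zero, List.reverse_nil]
      cases hd : L.drop left.toNat with
      | nil => simp [pvF]
      | cons a as => simp [pvF]
    · have : L.length ≤ left.toNat := by omega
      rw [List.drop_eq_nil_of_le this]
      simp [pvF]

def pvInner (arr : List Int) (i : Int) : Int :=
  (PySem.List.pyRange 0 (PySem.List.len arr) 1).foldl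
    (fun sum_val j =>
      if PySem.Int.band i (pvShl1 j.toNat) ≠ 0 then sum_val + PySem.List.pyGetD arr j 0
      else sum_val) 0

def pvMaskSum (arr : List Int) (m : Nat) : Int :=
  ((List.range arr.length).map (fun j => if m.testBit j then arr.getD j 0 else 0)).sum

theorem pvBand_ne_zero (i : Int) (j : Nat) (h : 0 ≤ i) :
    (PySem.Int.band i (pvShl1 j) ≠ 0) ↔ i.toNat.testBit j = true := by
  have h1 : pvShl1 j = ((2 ^ j : Nat) : Int) := by
    unfold pvShl1; rw [Int.shiftLeft_eq]; push_cast; ring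
  rw [h1]
  conv_lhs => rw [← Int.toNat_of_nonneg h]
  rw [PySem.Int.band_natCast]
  rw [Nat.and_two_pow]
  rcases hb : i.toNat.testBit j with _ | _ <;> simp [Nat.pos_iff_ne_zero.symm]

theorem pvInner_eq (arr : List Int) (i : Int) (h : 0 ≤ i) :
    pvInner arr i = pvMaskSum arr i.toNat := by
  unfold pvInner pvMaskSum
  have hstep : (fun (sum_val : Int) (j : Int) =>
      if PySem.Int.band i (pvShl1 j.toNat) ≠ 0 then sum_val + PySem.List.pyGetD arr j 0
      else sum_val)
      = (fun sum_val j => sum_val + (if PySem.Int.band i (pvShl1 j.toNat) ≠ 0 then PySem.List.pyGetD arr j 0 else 0)) := by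
    funext sv j; split
    · rfl
    · exact (add_zero sv).symm
  rw [hstep, PySem.List.foldl_add]
  simp only [PySem.List.len_eq, PySem.List.pyRange_one, zero_add, Int.sub_zero, Int.toNat_natCast,
    List.map_map]
  congr 1
  apply List.map_congr_left
  intro k hk
  simp only [Function.comp]
  rw [show ((k : Int)).toNat = k by omega]
  by_cases hb : i.toNat.testBit k = true
  · rw [if_pos ((pvBand_ne_zero i k h).mpr hb), if_pos hb]
    simp
  · rw [if_neg (by simpa [pvBand_ne_zero i k h] using hb), if_neg hb]

theorem pvMaskSum_low (arr : List Int) (w : Int) (m : Nat) (hm : m < 2 ^ arr.length) :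
    pvMaskSum (arr ++ [w]) m = pvMaskSum arr m := by
  unfold pvMaskSum
  rw [List.length_append, List.length_cons, List.length_nil, List.range_succ, List.map_append,
    List.sum_append]
  have hhigh : m.testBit arr.length = false := Nat.testBit_lt_two_pow hm
  simp only [List.map_cons, List.map_nil, hhigh, if_neg Bool.false_ne_true, List.sum_cons,
    List.sum_nil, add_zero]
  congr 1
  apply List.map_congr_left
  intro j hj
  rw [List.mem_range] at hj
  rw [List.getD_eq_getElem _ 0 (by simp; omega), List.getD_eq_getElem _ 0 hj,
    List.getElem_append_left hj]

theorem pvMaskSum_high (arr : List Int) (w : Int) (m : Nat) (hm : m < 2 ^ arr.length) :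
    pvMaskSum (arr ++ [w]) (2 ^ arr.length + m) = pvMaskSum arr m + w := by
  unfold pvMaskSum
  rw [List.length_append, List.length_cons, List.length_nil, List.range_succ, List.map_append,
    List.sum_append]
  have hhigh : (2 ^ arr.length + m).testBit arr.length = true := by
    rw [Nat.testBit_two_pow_add_eq, Nat.testBit_lt_two_pow hm]; rfl
  have hw : (arr ++ [w]).getD arr.length 0 = w := by
    rw [List.getD_eq_getElem _ 0 (by simp)]
    simp
  simp only [List.map_cons, List.map_nil, hhigh, List.sum_cons, List.sum_nil, add_zero, hw,
    if_pos]
  refine congrArg (· + w) (congrArg List.sum (List.map_congr_left ?_))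
  intro j hj
  rw [List.mem_range] at hj
  rw [Nat.testBit_two_pow_add_gt hj, List.getD_eq_getElem _ 0 (by simp; omega),
    List.getD_eq_getElem _ 0 hj, List.getElem_append_left hj]

-- the list built by subset_sum, in terms of mask sums
def pvM (arr : List Int) : List Int := (List.range (2 ^ arr.length)).map (pvMaskSum arr)

theorem pvSubsetSum_eq_pvM (arr : List Int) (acc : List Int) :
    pvSubsetSum arr acc = acc ++ pvM arr := by
  unfold pvSubsetSum
  dsimp only
  rw [show (fun (acc : List Int) (i : Int) =>
      acc ++ [(PySem.List.pyRange 0 (PySem.List.len arr) 1).foldl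
        (fun sum_val j =>
          if PySem.Int.band i (pvShl1 j.toNat) ≠ 0 then sum_val + PySem.List.pyGetD arr j 0
          else sum_val) 0])
      = (fun acc i => acc ++ [pvInner arr i]) from rfl]
  rw [PySem.List.foldl_append_singleton_eq_map]
  congr 1
  have h2 : pvShl1 (PySem.List.len arr).toNat = ((2 ^ arr.length : Nat) : Int) := by
    unfold pvShl1
    rw [Int.shiftLeft_eq]
    simp
  rw [h2, PySem.List.pyRange_zero_natCast]
  unfold pvM
  rw [List.map_map]
  apply List.map_congr_left
  intro k hk
  simp only [Function.comp]
  rw [pvInner_eq arr _ (by positivity)]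
  norm_num

theorem pvM_append (arr : List Int) (w : Int) :
    pvM (arr ++ [w]) = pvM arr ++ (pvM arr).map (fun s => s + w) := by
  unfold pvM
  rw [List.length_append, List.length_cons, List.length_nil, zero_add, pow_succ, mul_two,
    List.range_add, List.map_append, List.map_map]
  congr 1
  · apply List.map_congr_left
    intro m hm
    rw [List.mem_range] at hm
    exact pvMaskSum_low arr w m hm
  · rw [List.map_map]
    apply List.map_congr_left
    intro m hm
    rw [List.mem_range] at hm
    simp only [Function.comp]
    exact pvMaskSum_high arr w m hm

theorem pvSubsetSum_eq_allSums (arr : List Int) : pvSubsetSum arr [] = pvAllSums arr := by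
  induction arr using List.reverseRecOn with
  | nil => decide
  | append_singleton arr w ih =>
    rw [pvSubsetSum_eq_pvM, List.nil_append, pvM_append, ← List.nil_append (pvM arr),
      ← pvSubsetSum_eq_pvM, ih]
    unfold pvAllSums
    rw [List.foldl_append]
    rfl

theorem pvCountLe_inv (rs : List Int) (t : Int) (hs : rs.Pairwise (· ≤ ·)) (lo hi : Nat)
    (hhi : hi ≤ rs.length) (hlo : lo ≤ hi)
    (hbelow : ∀ i, i < lo → ∀ h : i < rs.length, rs[i] ≤ t)
    (habove : ∀ i, hi ≤ i → ∀ h : i < rs.length, t < rs[i]) :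
    pvCountLe rs t lo hi = rs.countP (fun r => decide (r ≤ t)) := by
  have hmono : ∀ (i j : Nat) (hij : i ≤ j) (h : j < rs.length),
      rs[i]'(Nat.lt_of_le_of_lt hij h) ≤ rs[j] := by
    intro i j hij h
    rcases Nat.eq_or_lt_of_le hij with rfl | hlt
    · exact le_refl _
    · exact List.pairwise_iff_getElem.mp hs i j _ h hlt
  revert hhi hlo hbelow habove
  fun_induction pvCountLe rs t lo hi with
  | case1 lo hi hlt m hle ih =>
    intro hhi hlo hbelow habove
    have hmdef : m = (lo + hi) / 2 := rfl
    have hmlen : m < rs.length := by omega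
    rw [List.getD_eq_getElem rs 0 hmlen] at hle
    apply ih (by omega) (by omega)
    · intro i hi' h
      have : rs[i] ≤ rs[m] := hmono i m (by omega) hmlen
      omega
    · exact habove
  | case2 lo hi hlt m hle ih =>
    intro hhi hlo hbelow habove
    have hmdef : m = (lo + hi) / 2 := rfl
    have hmlen : m < rs.length := by omega
    rw [List.getD_eq_getElem rs 0 hmlen] at hle
    apply ih (by omega) (by omega) hbelow
    intro i hi' h
    have : rs[m] ≤ rs[i] := hmono m i hi' h
    omega
  | case3 lo hi hge =>
    intro hhi hlo hbelow habove
    have heq : lo = hi := by omega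
    subst heq
    conv_rhs => rw [← List.take_append_drop lo rs]
    rw [List.countP_append]
    have h1 : (rs.take lo).countP (fun r => decide (r ≤ t)) = lo := by
      rw [List.countP_eq_length.mpr, List.length_take_of_le (by omega)]
      intro a ha
      rw [List.mem_take_iff_getElem] at ha
      obtain ⟨j, hj, hx⟩ := ha
      subst hx
      simp only [decide_eq_true_eq]
      exact hbelow j (by omega) (by omega)
    have h2 : (rs.drop lo).countP (fun r => decide (r ≤ t)) = 0 := by
      rw [List.countP_eq_zero]
      intro a ha
      rw [List.mem_drop_iff_getElem] at ha
      obtain ⟨j, hj, hx⟩ := ha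
      subst hx
      simp only [decide_eq_true_eq, not_le]
      exact habove (lo + j) (by omega) (by omega)
    omega

theorem pvCountLe_spec (rs : List Int) (t : Int) (hs : rs.Pairwise (· ≤ ·)) :
    pvCountLe rs t 0 rs.length = rs.countP (fun r => decide (r ≤ t)) :=
  pvCountLe_inv rs t hs 0 rs.length (le_refl _) (Nat.zero_le _)
    (fun i hi _ => absurd hi (Nat.not_lt_zero i)) (fun i hi h => absurd h (by omega))

theorem count_subsets_eq (weights : List Int) (capacity : Int) :
    count_subsets weights capacity = count_subsets_alt weights capacity := by
  unfold count_subsets count_subsets_alt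
  dsimp only
  rw [pvSubsetSum_eq_allSums, pvSubsetSum_eq_allSums]
  set LS := pvAllSums (PySem.List.slice weights none (some (PySem.Int.floordiv (PySem.List.len weights) 2))) with hLS
  set RS := pvAllSums (PySem.List.slice weights (some (PySem.Int.floordiv (PySem.List.len weights) 2)) none) with hRS
  set Ls2 := PySem.List.sorted LS (fun x => x) false with hLs2
  set Rs2 := PySem.List.sorted RS (fun x => x) false with hRs2
  have hRsorted : Rs2.Pairwise (· ≤ ·) := PySem.List.sorted_pairwise RS (fun x => x)
  have hLsorted : Ls2.Pairwise (· ≤ ·) := PySem.List.sorted_pairwise LS (fun x => x)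
  rw [pvTwoPtr_eq Ls2 Rs2 capacity 0 (PySem.List.len Rs2 - 1) 0 (le_refl 0)
    (by simp only [PySem.List.len_eq]; omega)]
  have h1 : ((PySem.List.len Rs2 - 1 + 1)).toNat = Rs2.length := by
    simp only [PySem.List.len_eq]; omega
  rw [h1, List.take_length]
  have h0 : (0 : Int).toNat = 0 := rfl
  rw [h0, List.drop_zero, zero_add]
  rw [pvF_spec capacity Ls2 Rs2.reverse hLsorted (List.pairwise_reverse.mpr hRsorted)]
  have hfun : ∀ l : Int, pvCnt capacity l Rs2.reverse
      = ((pvCountLe Rs2 (capacity - l) 0 Rs2.length : Nat) : Int) := by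
    intro l
    unfold pvCnt
    rw [List.countP_reverse]
    rw [show (fun r => decide (l + r ≤ capacity)) = (fun r => decide (r ≤ capacity - l)) by
      funext r; rw [decide_eq_decide]; omega]
    rw [pvCountLe_spec Rs2 (capacity - l) hRsorted]
  simp only [hfun]
  exact List.Perm.sum_eq (List.Perm.map _ (PySem.List.sorted_perm LS (fun x => x) false))

-- ===== VERDICT (by name: the statement is the Claim_ definition above) =====
theorem count_subsets_spec : Claim_equal_count_subsets := by
  intro weights capacity _
  unfold Spec_count_subsets
  exact count_subsets_eq weights capacity
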